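-- pv_equiv track=rewrite | github.com/xiaohaomao/timgroup_disease_diagnosis | codes/core/core/patient/patient_generator.py | diseases_from_all_sources
-- ===== SOURCE A (Python) =====
-- def diseases_from_all_sources(dis_codes, sources):
-- 	if len(dis_codes) == 0:
-- 		return False
-- 	source_to_contain = {s: False for s in sources}
-- 	for dis_code in dis_codes:
-- 		for s in sources:
-- 			if dis_code.startswith(s):
-- 				source_to_contain[s] = True
-- 	source_num = sum(source_to_contain.values())
-- 	if source_num == 0:
-- 		raise RuntimeError('Wrong disease codes:', dis_codes)
-- 	return source_num == len(sources)
-- ===== SOURCE B (Python) =====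
-- def diseases_from_all_sources(dis_codes, sources):
-- 	if not dis_codes:
-- 		return False
-- 	prefixes = {c[:i] for c in dis_codes for i in range(len(c) + 1)}
-- 	return len(set(sources) & prefixes) == len(sources)
-- ===== Notes on version B (the rewrite author's own statement) =====
-- stated objective: faster
-- what changed: Replaces the dict-of-flags nested scan (every code against every source) with a set of all prefixes of the disease codes built once, then one set intersection with the sources; the distinct-matched count is compared to len(sources) exactly as A does.
import Mathlib
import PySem

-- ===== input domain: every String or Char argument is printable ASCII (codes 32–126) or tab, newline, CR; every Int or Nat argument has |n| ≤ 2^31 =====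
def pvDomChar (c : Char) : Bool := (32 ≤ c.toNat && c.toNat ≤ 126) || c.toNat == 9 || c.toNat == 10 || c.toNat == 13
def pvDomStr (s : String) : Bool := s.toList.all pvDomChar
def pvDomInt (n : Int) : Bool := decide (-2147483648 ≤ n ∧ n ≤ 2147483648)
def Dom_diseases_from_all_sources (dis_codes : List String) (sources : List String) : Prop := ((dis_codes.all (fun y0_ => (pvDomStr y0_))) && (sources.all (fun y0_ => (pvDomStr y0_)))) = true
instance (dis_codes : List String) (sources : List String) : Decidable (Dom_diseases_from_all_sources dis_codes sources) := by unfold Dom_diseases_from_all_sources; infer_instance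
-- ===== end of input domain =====

-- B replaces A's dict-of-flags nested scan with a set of all prefixes of the disease codes built
-- once, then one set intersection with the sources (objective: faster).

-- ===== PORT A =====
def diseases_from_all_sources (dis_codes : List String) (sources : List String) : Bool :=
  if dis_codes.length == 0 then false
  else
    let source_to_contain : PySem.Dict String Bool :=
      sources.foldl (fun d s => d.insert s false) PySem.Dict.empty
    let final := dis_codes.foldl (fun d dis_code =>
      sources.foldl (fun d s =>
        if PySem.Str.startswith dis_code s then d.insert s true else d) d) source_to_contain
    let source_num : Int := (final.values.map (fun b => if b then (1 : Int) else 0)).sum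
    if source_num == 0 then false  -- Python raises RuntimeError here; these inputs are outside Pre_
    else source_num == (sources.length : Int)

-- ===== PORT B =====
def diseases_from_all_sources_alt (dis_codes : List String) (sources : List String) : Bool :=
  if dis_codes.isEmpty then false
  else
    let prefixes : PySem.Set String :=
      PySem.Set.ofList (dis_codes.flatMap (fun c =>
        (PySem.List.pyRange 0 (PySem.Str.len c + 1)).map
          (fun i => PySem.Str.slice c none (some i))))
    PySem.Set.len (PySem.Set.inter (PySem.Set.ofList sources) prefixes) == (sources.length : Int)

-- ===== PRECONDITION & SPEC =====
-- Pre_ excludes exactly the inputs where A raises RuntimeError: a nonempty dis_codes with no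
-- (code, source) pair where the code starts with the source (this includes empty sources).
def Pre_diseases_from_all_sources (dis_codes : List String) (sources : List String) : Prop :=
  dis_codes = [] ∨ ∃ s ∈ sources, ∃ c ∈ dis_codes, PySem.Str.startswith c s = true
instance (dis_codes : List String) (sources : List String) : Decidable (Pre_diseases_from_all_sources dis_codes sources) := by unfold Pre_diseases_from_all_sources; infer_instance
def pvWitness_diseases_from_all_sources : List String × List String := (["ab"], ["a"])

def Spec_diseases_from_all_sources (dis_codes : List String) (sources : List String) (out : Bool) : Prop := out = diseases_from_all_sources_alt dis_codes sources
instance (dis_codes : List String) (sources : List String) (out : Bool) : Decidable (Spec_diseases_from_all_sources dis_codes sources out) := by unfold Spec_diseases_from_all_sources; infer_instance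

-- ===== CLAIM (what is proved, stated in full; the proofs are below) =====
def Claim_equal_diseases_from_all_sources : Prop := ∀ (dis_codes : List String) (sources : List String), Dom_diseases_from_all_sources dis_codes sources → Pre_diseases_from_all_sources dis_codes sources → Spec_diseases_from_all_sources dis_codes sources (diseases_from_all_sources dis_codes sources)

-- ===== LEMMAS AND PROOFS =====

-- 'matched s' = some disease code starts with s
def pvMatched (dis_codes : List String) (s : String) : Bool :=
  dis_codes.any (fun c => PySem.Str.startswith c s)

-- ---- B-side characterization ----
lemma mem_prefixList_iff (c s : String) :
    (s ∈ (PySem.List.pyRange 0 (PySem.Str.len c + 1)).map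
          (fun i => PySem.Str.slice c none (some i))) ↔
      PySem.Str.startswith c s = true := by
  rw [PySem.Str.startswith_eq, PySem.Chars.startswith_iff]
  constructor
  · rintro h
    rcases List.mem_map.1 h with ⟨i, hi, he⟩
    rcases PySem.List.mem_pyRange_one.1 hi with ⟨h0, _⟩
    have ht : s.toList = c.toList.take i.toNat := by
      rw [← he, PySem.Str.toList_slice, PySem.Chars.slice_eq_listSlice,
        PySem.List.slice_to c.toList h0]
    rw [ht]; exact List.take_prefix _ _
  · intro hp
    refine List.mem_map.2 ⟨(s.toList.length : Int), ?_, ?_⟩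
    · refine PySem.List.mem_pyRange_one.2 ⟨by positivity, ?_⟩
      rw [PySem.Str.len_eq]
      have := hp.length_le
      omega
    · apply String.toList_inj.mp
      rw [PySem.Str.toList_slice, PySem.Chars.slice_eq_listSlice,
        PySem.List.slice_to c.toList (by positivity), Int.toNat_natCast]
      exact (List.prefix_iff_eq_take.1 hp).symm

lemma alt_eq (dis_codes sources : List String) :
    diseases_from_all_sources_alt dis_codes sources =
      (!dis_codes.isEmpty &&
        (((List.countP (fun s => pvMatched dis_codes s) (PySem.Set.ofList sources) : Nat) : Int)
          == (sources.length : Int))) := by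
  unfold diseases_from_all_sources_alt
  by_cases h : dis_codes.isEmpty
  · simp [h]
  · rw [if_neg h]
    simp only [h, Bool.not_false, Bool.true_and]
    have hc : ∀ s, PySem.Set.contains (PySem.Set.ofList (dis_codes.flatMap (fun c =>
        (PySem.List.pyRange 0 (PySem.Str.len c + 1)).map
          (fun i => PySem.Str.slice c none (some i))))) s = pvMatched dis_codes s := by
      intro s
      rw [Bool.eq_iff_iff, PySem.Set.contains_iff, PySem.Set.mem_ofList, List.mem_flatMap]
      unfold pvMatched
      rw [List.any_eq_true]
      constructor
      · rintro ⟨c, hcm, hm⟩; exact ⟨c, hcm, (mem_prefixList_iff c s).1 hm⟩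
      · rintro ⟨c, hcm, hm⟩; exact ⟨c, hcm, (mem_prefixList_iff c s).2 hm⟩
    show (PySem.Set.len (PySem.Set.inter (PySem.Set.ofList sources) _) == (sources.length : Int)) = _
    rw [PySem.Set.inter, PySem.Set.len]
    simp only [hc]
    rw [List.countP_eq_length_filter]

-- ---- A-side characterization ----
-- the inner loop body over sources for one disease code
lemma get?_init (sources : List String) (d : PySem.Dict String Bool) (s : String) :
    (sources.foldl (fun d s => d.insert s false) d).get? s =
      if s ∈ sources then some false else d.get? s := by
  induction sources generalizing d with
  | nil => simp
  | cons a l ih =>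
    simp only [List.foldl_cons, ih]
    by_cases hsl : s ∈ l
    · simp [hsl]
    · by_cases hsa : s = a
      · subst hsa; simp [hsl, PySem.Dict.get?_insert_self]
      · simp [hsl, hsa, PySem.Dict.get?_insert_of_ne d false hsa]

lemma keys_init (sources : List String) :
    (sources.foldl (fun d s => d.insert s false) (PySem.Dict.empty : PySem.Dict String Bool)).keys
      = PySem.Set.ofList sources := by
  have h := PySem.Dict.keys_foldl_insert sources (fun _ _ => false)
      (PySem.Dict.empty : PySem.Dict String Bool)
  simpa using h

lemma keys_inner (c : String) (l : List String) (d : PySem.Dict String Bool)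
    (h : ∀ x ∈ l, x ∈ d.keys) :
    (l.foldl (fun d s => if PySem.Str.startswith c s then d.insert s true else d) d).keys
      = d.keys := by
  induction l generalizing d with
  | nil => rfl
  | cons a t ih =>
    simp only [List.foldl_cons]
    by_cases hc : PySem.Str.startswith c a = true
    · have hk : (d.insert a true).keys = d.keys :=
        PySem.Dict.keys_insert_of_contains d true ((PySem.Dict.contains_iff_mem_keys d a).2 (h a (by simp)))
      rw [if_pos hc, ih _ (fun x hx => by rw [hk]; exact h x (by simp [hx]))]
      exact hk
    · rw [if_neg hc]; exact ih _ (fun x hx => h x (by simp [hx]))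

lemma get?_inner_not_mem (c s : String) (l : List String) (d : PySem.Dict String Bool)
    (h : s ∉ l) :
    (l.foldl (fun d s => if PySem.Str.startswith c s then d.insert s true else d) d).get? s
      = d.get? s := by
  induction l generalizing d with
  | nil => rfl
  | cons a t ih =>
    have hsa : s ≠ a := fun he => h (he ▸ List.mem_cons_self)
    have hst : s ∉ t := fun ht => h (List.mem_cons_of_mem _ ht)
    simp only [List.foldl_cons]
    rw [ih _ hst]
    by_cases hc : PySem.Str.startswith c a = true
    · rw [if_pos hc, PySem.Dict.get?_insert_of_ne d true hsa]
    · rw [if_neg hc]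

lemma get?_inner_mem (c s : String) (l : List String) (d : PySem.Dict String Bool) (b : Bool)
    (hs : s ∈ l) (hd : d.get? s = some b) :
    (l.foldl (fun d s => if PySem.Str.startswith c s then d.insert s true else d) d).get? s
      = some (b || PySem.Str.startswith c s) := by
  induction l generalizing d b with
  | nil => cases hs
  | cons a t ih =>
    simp only [List.foldl_cons]
    by_cases hsa : s = a
    · subst hsa
      by_cases hc : PySem.Str.startswith c s = true
      · rw [if_pos hc]
        by_cases hst : s ∈ t
        · rw [ih _ _ hst (PySem.Dict.get?_insert_self d s true)]
          simp only [hc, Bool.or_true]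
        · rw [get?_inner_not_mem c s t _ hst, PySem.Dict.get?_insert_self]
          simp only [hc, Bool.or_true]
      · rw [if_neg hc]
        simp only [Bool.not_eq_true] at hc
        by_cases hst : s ∈ t
        · rw [ih _ _ hst hd]
        · rw [get?_inner_not_mem c s t _ hst, hd, hc, Bool.or_false]
    · have hst : s ∈ t := by
        rcases List.mem_cons.1 hs with h | h
        · exact absurd h hsa
        · exact h
      by_cases hc : PySem.Str.startswith c a = true
      · rw [if_pos hc, ih _ _ hst (by rw [PySem.Dict.get?_insert_of_ne d true hsa]; exact hd)]
      · rw [if_neg hc, ih _ _ hst hd]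

lemma get?_outer (sources : List String) (s : String) (cs : List String)
    (d : PySem.Dict String Bool) (b : Bool) (hd : d.get? s = some b) (hs : s ∈ sources) :
    ((cs.foldl (fun d dis_code => sources.foldl
        (fun d s => if PySem.Str.startswith dis_code s then d.insert s true else d) d) d).get? s)
      = some (b || pvMatched cs s) := by
  induction cs generalizing d b with
  | nil => simpa [pvMatched] using hd
  | cons c t ih =>
    simp only [List.foldl_cons]
    rw [ih _ _ (get?_inner_mem c s sources d b hs hd)]
    simp [pvMatched, Bool.or_assoc]

lemma keys_outer (sources : List String) (cs : List String) (d : PySem.Dict String Bool)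
    (h : d.keys = PySem.Set.ofList sources) :
    (cs.foldl (fun d dis_code => sources.foldl
        (fun d s => if PySem.Str.startswith dis_code s then d.insert s true else d) d) d).keys
      = PySem.Set.ofList sources := by
  induction cs generalizing d with
  | nil => exact h
  | cons c t ih =>
    simp only [List.foldl_cons]
    refine ih _ ?_
    rw [keys_inner c sources d (fun x hx => by rw [h]; exact (PySem.Set.mem_ofList sources x).2 hx)]
    exact h

lemma A_eq (dis_codes sources : List String) (hne : dis_codes ≠ []) :
    diseases_from_all_sources dis_codes sources =
      (if ((List.countP (fun s => pvMatched dis_codes s) (PySem.Set.ofList sources) : Nat) : Int) == 0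
       then false
       else ((List.countP (fun s => pvMatched dis_codes s) (PySem.Set.ofList sources) : Nat) : Int)
              == (sources.length : Int)) := by
  have h0 : (dis_codes.length == 0) = false := by
    simp [List.length_eq_zero_iff, hne]
  unfold diseases_from_all_sources
  rw [h0]
  simp only [Bool.false_eq_true, if_false]
  set d0 := sources.foldl (fun d s => d.insert s false) (PySem.Dict.empty : PySem.Dict String Bool) with hd0
  set final := dis_codes.foldl (fun d dis_code =>
      sources.foldl (fun d s =>
        if PySem.Str.startswith dis_code s then d.insert s true else d) d) d0 with hfinal
  have hkeys : final.keys = PySem.Set.ofList sources :=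
    keys_outer sources dis_codes d0 (keys_init sources)
  have hvals : final.values = (PySem.Set.ofList sources).map (fun s => pvMatched dis_codes s) := by
    rw [PySem.Dict.values_eq_map_keys final (by rw [hkeys]; exact PySem.Set.nodup_ofList sources) false,
      hkeys]
    refine List.map_congr_left (fun k hk => ?_)
    have hks : k ∈ sources := (PySem.Set.mem_ofList sources k).1 hk
    have hg : final.get? k = some (pvMatched dis_codes k) := by
      rw [hfinal, get?_outer sources k dis_codes d0 false ?_ hks]
      · simp
      · rw [hd0, get?_init]
        simp [hks]
    rw [PySem.Dict.getD_eq_get?_getD, hg]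
    rfl
  have hsum : (final.values.map (fun b => if b then (1 : Int) else 0)).sum
      = ((List.countP (fun s => pvMatched dis_codes s) (PySem.Set.ofList sources) : Nat) : Int) := by
    rw [hvals, List.map_map]
    have := PySem.List.sum_map_ite_one_zero (fun s => pvMatched dis_codes s) (PySem.Set.ofList sources)
    simpa [Function.comp] using this
  rw [hsum]

theorem diseases_from_all_sources_spec : Claim_equal_diseases_from_all_sources := by
  intro dis_codes sources _ hpre
  unfold Spec_diseases_from_all_sources
  rcases hpre with h | ⟨s0, hs0, c0, hc0, hsw⟩
  · subst h
    rfl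
  · have hne : dis_codes ≠ [] := List.ne_nil_of_mem hc0
    rw [A_eq dis_codes sources hne, alt_eq, List.isEmpty_eq_false_iff.mpr hne]
    simp only [Bool.not_false, Bool.true_and]
    have hm0 : pvMatched dis_codes s0 = true := List.any_eq_true.2 ⟨c0, hc0, hsw⟩
    have hpos : 0 < List.countP (fun s => pvMatched dis_codes s) (PySem.Set.ofList sources) :=
      List.countP_pos_iff.2 ⟨s0, (PySem.Set.mem_ofList sources s0).2 hs0, hm0⟩
    rw [if_neg (by simp only [beq_iff_eq]; omega)]
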